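-- pv_equiv track=rewrite | github.com/theLegendOfL1nk/List_bot | list_bot.py | sort_by_owner_tally
-- ===== SOURCE A (Python) =====
-- from collections import Counter
--
-- def sort_by_owner_tally(data):
--     if not data:
--         return []
--     name_counts = Counter(row[1].lower() for row in data)
--     def custom_sort_key(row):
--         name = row[1].lower()
--         # Safely convert cost to int, defaulting to 0
--         try:
--             cost = int(row[2])
--         except (IndexError, ValueError):
--             cost = 0
--         return (-name_counts[name], name, -cost)
--     return sorted(data, key=custom_sort_key)
-- ===== SOURCE B (Python) =====
-- def sort_by_owner_tally(data):
--     # Bucket rows by lowercased owner name, order the distinct names by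
--     # (-bucket size, name), then concatenate each bucket sorted by -cost.
--     buckets = {}
--     for row in data:
--         buckets.setdefault(row[1].lower(), []).append(row)
--
--     def cost(row):
--         try:
--             return int(row[2])
--         except (IndexError, ValueError):
--             return 0
--
--     names = sorted(buckets, key=lambda n: (-len(buckets[n]), n))
--     out = []
--     for n in names:
--         out.extend(sorted(buckets[n], key=lambda r: -cost(r)))
--     return out
-- ===== Notes on version B (the rewrite author's own statement) =====
-- stated objective: alternative
-- what changed: Replaces the single composite-key sort (-count, name, -cost) by building a name->rows bucket index in one pass, ordering the distinct names by (-bucket size, name), and concatenating each bucket sorted by -cost alone.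
import Mathlib
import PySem

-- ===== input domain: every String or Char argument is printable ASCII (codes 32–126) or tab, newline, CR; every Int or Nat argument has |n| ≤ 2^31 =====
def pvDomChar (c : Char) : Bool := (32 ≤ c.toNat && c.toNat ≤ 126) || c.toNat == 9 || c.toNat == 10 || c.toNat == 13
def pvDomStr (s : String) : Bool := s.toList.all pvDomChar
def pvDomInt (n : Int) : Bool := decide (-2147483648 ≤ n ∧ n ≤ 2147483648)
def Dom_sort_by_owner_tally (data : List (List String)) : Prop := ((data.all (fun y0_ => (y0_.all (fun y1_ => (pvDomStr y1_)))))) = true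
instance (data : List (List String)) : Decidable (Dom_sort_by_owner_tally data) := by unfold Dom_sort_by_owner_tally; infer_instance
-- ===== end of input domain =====

-- B re-implements the composite-key sort as bucket-by-name + per-bucket sort (alternative decomposition, same result).

-- shared helpers: row[1].lower() and the guarded int(row[2]) (IndexError/ValueError -> 0), as both Pythons compute them
def pvName (row : List String) : String := PySem.Str.lower (PySem.List.pyGetD row 1 "")
def pvCost (row : List String) : Int := ((PySem.List.pyGet? row 2).bind (fun s => PySem.Int.ofStr? s)).getD 0

-- ===== PORT A =====
-- Python's 3-tuple key (-count, name, -cost) is ported as sorted2 with first key the count and second the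
-- lexicographic pair name ×ₗ (-cost): exact for Python's tuple comparison on (int, str, int).
def sort_by_owner_tally (data : List (List String)) : List (List String) :=
  if data = [] then []
  else
    let name_counts := PySem.Dict.counter (data.map (fun row => pvName row))
    PySem.List.sorted2 data
      (fun row => -(name_counts.getD (pvName row) 0))
      (fun row => (toLex (pvName row, -(pvCost row)) : String ×ₗ ℤ)) false

-- ===== PORT B =====
def sort_by_owner_tally_alt (data : List (List String)) : List (List String) :=
  let buckets := data.foldl (fun d row => d.modify (pvName row) [] (fun b => b ++ [row])) PySem.Dict.empty
  let names := PySem.List.sorted2 buckets.keys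
      (fun n => -(PySem.List.len (buckets.getD n []))) (fun n => n) false
  names.foldl (fun out n => out ++ PySem.List.sorted (buckets.getD n []) (fun r => -(pvCost r)) false) []

-- ===== PRECONDITION & SPEC =====
-- Pre_ excludes exactly the inputs on which Python A raises: a row of length < 2 makes row[1] an IndexError.
def Pre_sort_by_owner_tally (data : List (List String)) : Prop := ∀ row ∈ data, 2 ≤ row.length
instance (data : List (List String)) : Decidable (Pre_sort_by_owner_tally data) := by unfold Pre_sort_by_owner_tally; infer_instance

def pvWitness_sort_by_owner_tally : List (List String) :=
  [["1", "Bob", "3"], ["2", "a", "x"], ["3", "bob"], ["4", "A", "+5"], ["5", "a", " 7 "]]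

def Spec_sort_by_owner_tally (data : List (List String)) (out : List (List String)) : Prop := out = sort_by_owner_tally_alt data
instance (data : List (List String)) (out : List (List String)) : Decidable (Spec_sort_by_owner_tally data out) := by unfold Spec_sort_by_owner_tally; infer_instance

-- ===== CLAIM (what is proved, stated in full; the proofs are below) =====
def Claim_equal_sort_by_owner_tally : Prop := ∀ (data : List (List String)), Dom_sort_by_owner_tally data → Pre_sort_by_owner_tally data → Spec_sort_by_owner_tally data (sort_by_owner_tally data)

-- ===== LEMMAS AND PROOFS =====

-- the count function both sides end up sorting by
def pvC (data : List (List String)) (n : String) : ℤ := ((data.map pvName).count n : ℤ)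

-- proof-side keys: the (-count, name) pair and the full (-count, name, -cost) triple, as lexicographic orders
def pvNKey (c : String → ℤ) (n : String) : ℤ ×ₗ String := toLex (-(c n), n)
def pvRKey (c : String → ℤ) (r : List String) : ℤ ×ₗ (String ×ₗ ℤ) :=
  toLex (-(c (pvName r)), toLex (pvName r, -(pvCost r)))

-- B's normal form: names in (-count, name) order, each bucket (a filter of data) in -cost order
def pvGrp (ys : List (List String)) (n : String) : List (List String) :=
  PySem.List.sorted (ys.filter (fun r => pvName r == n)) (fun r => -(pvCost r)) false
def pvNames (c : String → ℤ) (ys : List (List String)) : List String :=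
  PySem.List.sorted (PySem.Set.ofList (ys.map pvName)) (pvNKey c) false
def pvF (c : String → ℤ) (ys : List (List String)) : List (List String) :=
  (pvNames c ys).flatMap (pvGrp ys)

-- sorted2's comparator is the decide of the lexicographic pair order
lemma pv_lex_decide {κ1 κ2 : Type} [LinearOrder κ1] [LinearOrder κ2] (x y : κ1) (u v : κ2) :
    (decide (x < y) || (!decide (y < x) && decide (u < v))) = decide (toLex (x, u) < toLex (y, v)) := by
  rcases lt_trichotomy x y with h | h | h
  · simp [Prod.Lex.toLex_lt_toLex, h]
  · simp [Prod.Lex.toLex_lt_toLex, h]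
  · simp [Prod.Lex.toLex_lt_toLex, h, not_lt_of_gt h, ne_of_gt h]

lemma pv_insertBy_congr {α : Type} (b b' : α → α → Bool) (x : α) (ys : List α)
    (h : ∀ y ∈ ys, b x y = b' x y) :
    PySem.List.insertBy b x ys = PySem.List.insertBy b' x ys := by
  induction ys with
  | nil => rfl
  | cons y ys ih =>
    have hy := h y (by simp)
    simp only [PySem.List.insertBy, hy]
    by_cases hb : b' x y = true
    · simp [hb]
    · simp only [Bool.not_eq_true] at hb
      simp [hb, ih (fun z hz => h z (by simp [hz]))]

lemma pv_insertBy_all_false {α : Type} (b : α → α → Bool) (x : α) (l t : List α)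
    (h : ∀ y ∈ l, b x y = false) :
    PySem.List.insertBy b x (l ++ t) = l ++ PySem.List.insertBy b x t := by
  induction l with
  | nil => rfl
  | cons y l ih =>
    have hy := h y (by simp)
    simp only [List.cons_append, PySem.List.insertBy, hy]
    simp [ih (fun z hz => h z (by simp [hz]))]

lemma pv_insertBy_all_true {α : Type} (b : α → α → Bool) (x : α) (t : List α)
    (h : ∀ y ∈ t, b x y = true) :
    PySem.List.insertBy b x t = x :: t := by
  cases t with
  | nil => rfl
  | cons y t => simp [PySem.List.insertBy, h y (by simp)]

lemma pv_insertBy_hit {α : Type} (b : α → α → Bool) (x : α) (l t : List α)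
    (h : ∃ y ∈ l, b x y = true) :
    PySem.List.insertBy b x (l ++ t) = PySem.List.insertBy b x l ++ t := by
  induction l with
  | nil => simp at h
  | cons y l ih =>
    by_cases hy : b x y = true
    · simp [PySem.List.insertBy, hy]
    · simp only [Bool.not_eq_true] at hy
      have : ∃ z ∈ l, b x z = true := by
        rcases h with ⟨z, hz, hbz⟩
        rcases List.mem_cons.mp hz with rfl | hz
        · exact absurd hbz (by simp [hy])
        · exact ⟨z, hz, hbz⟩
      simp [PySem.List.insertBy, hy, ih this]

lemma pvNKey_inj (c : String → ℤ) {a b : String} (h : pvNKey c a = pvNKey c b) : a = b := by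
  unfold pvNKey at h
  have := congrArg (fun p => (ofLex p).2) h
  simpa using this

lemma pvRKey_lt_iff (c : String → ℤ) (r s : List String) :
    pvRKey c r < pvRKey c s ↔
      pvNKey c (pvName r) < pvNKey c (pvName s) ∨
        (pvName r = pvName s ∧ -(pvCost r) < -(pvCost s)) := by
  simp only [pvRKey, pvNKey, Prod.Lex.toLex_lt_toLex]
  constructor
  · rintro (h | ⟨h1, (h2 | ⟨h2, h3⟩)⟩)
    · exact Or.inl (Or.inl h)
    · exact Or.inl (Or.inr ⟨h1, h2⟩)
    · exact Or.inr ⟨h2, h3⟩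
  · rintro ((h | ⟨h1, h2⟩) | ⟨h1, h2⟩)
    · exact Or.inl h
    · exact Or.inr ⟨h1, Or.inl h2⟩
    · exact Or.inr ⟨by rw [h1], Or.inr ⟨h1, h2⟩⟩

-- sorted depends on the key only through its values on the list's members
lemma pv_sorted_key_congr {α κ : Type} [LT κ] [DecidableLT κ] (xs : List α) (f f' : α → κ)
    (h : ∀ a ∈ xs, f a = f' a) :
    PySem.List.sorted xs f false = PySem.List.sorted xs f' false := by
  rw [PySem.List.sorted_eq_foldl_insertBy, PySem.List.sorted_eq_foldl_insertBy]
  suffices H : ∀ (l acc : List α), (∀ a ∈ l, f a = f' a) → (∀ a ∈ acc, f a = f' a) →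
      l.foldl (fun acc x => PySem.List.insertBy (fun a b => decide (f a < f b)) x acc) acc
        = l.foldl (fun acc x => PySem.List.insertBy (fun a b => decide (f' a < f' b)) x acc) acc from
    H xs [] h (by simp)
  intro l
  induction l with
  | nil => intro acc _ _; rfl
  | cons x l ih =>
    intro acc hl hacc
    have hx : f x = f' x := hl x (by simp)
    simp only [List.foldl_cons]
    rw [pv_insertBy_congr _ (fun a b => decide (f' a < f' b)) x acc
        (fun y hy => by rw [hx, hacc y hy])]
    exact ih _ (fun a ha => hl a (by simp [ha]))
      (fun a ha => by
        rcases (PySem.List.mem_insertBy _ _ _ _).mp ha with rfl | ha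
        · exact hx
        · exact hacc a ha)

-- sorted2 with keys k1, k2 is sorted with the lexicographic pair key
lemma pv_sorted2_eq_sorted_lex {α κ1 κ2 : Type} [LinearOrder κ1] [LinearOrder κ2]
    (xs : List α) (k1 : α → κ1) (k2 : α → κ2) :
    PySem.List.sorted2 xs k1 k2 false = PySem.List.sorted xs (fun a => toLex (k1 a, k2 a)) false := by
  rw [PySem.List.sorted_eq_foldl_insertBy]
  show xs.foldl (fun acc x => PySem.List.insertBy
      (fun a b => decide (k1 a < k1 b) || (!decide (k1 b < k1 a) && decide (k2 a < k2 b))) x acc) []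
    = _
  simp only [pv_lex_decide]

-- B's bucket dict: lookup is the filter, keys are the distinct names in order
lemma pv_bucket (data : List (List String)) (n : String) :
    (data.foldl (fun d row => d.modify (pvName row) [] (fun b => b ++ [row])) PySem.Dict.empty).getD n []
      = data.filter (fun r => pvName r == n) := by
  have h1 : data.foldl (fun d row => d.modify (pvName row) [] (fun b => b ++ [row])) PySem.Dict.empty
      = (data.map (fun r => (pvName r, r))).foldl (fun d p => d.modify p.1 [] (fun b => b ++ [p.2])) PySem.Dict.empty := by
    rw [List.foldl_map]
  rw [h1, PySem.Dict.getD_foldl_modify_append, PySem.Dict.getD_empty, List.filter_map]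
  simp [Function.comp_def]

lemma pv_keys (data : List (List String)) :
    (data.foldl (fun d row => d.modify (pvName row) [] (fun b => b ++ [row])) PySem.Dict.empty).keys
      = PySem.Set.ofList (data.map pvName) := by
  rw [PySem.Dict.keys_foldl_modify_key data pvName [] (fun d row => (fun b => b ++ [row])) PySem.Dict.empty]
  rw [PySem.Dict.keys_empty]
  rw [PySem.Set.ofList_eq_foldl]
  rfl

lemma pv_filter_length (data : List (List String)) (n : String) :
    ((data.filter (fun r => pvName r == n)).length : ℤ) = pvC data n := by
  rw [← List.countP_eq_length_filter, pvC]
  norm_cast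
  rw [List.count_eq_countP]
  rw [List.countP_map]
  rfl


lemma pv_flatMap_congr {α β : Type} (l : List α) (f g : α → List β)
    (h : ∀ a ∈ l, f a = g a) : l.flatMap f = l.flatMap g := by
  induction l with
  | nil => rfl
  | cons a l ih =>
    simp only [List.flatMap_cons, h a (by simp), ih (fun b hb => h b (by simp [hb]))]

-- the heart: inserting one row into the grouped normal form
lemma pv_insert_flat (c : String → ℤ) (g : String → List (List String)) (x : List String)
    (N : List String)
    (h1 : N.Pairwise (fun a b => pvNKey c a < pvNKey c b))
    (h2 : ∀ n ∈ N, ∀ r ∈ g n, pvName r = n)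
    (h5 : pvName x ∉ N → g (pvName x) = []) :
    PySem.List.insertBy (fun a b => decide (pvRKey c a < pvRKey c b)) x (N.flatMap g)
      = (if pvName x ∈ N then N
         else PySem.List.insertBy (fun a b => decide (pvNKey c a < pvNKey c b)) (pvName x) N).flatMap
          (fun n => if n = pvName x
                    then PySem.List.insertBy (fun a b => decide ((-(pvCost a) : ℤ) < -(pvCost b))) x (g n)
                    else g n) := by
  induction N with
  | nil =>
    rw [if_neg (List.not_mem_nil)]
    simp [PySem.List.insertBy, h5 (List.not_mem_nil)]
  | cons n t ih =>
    have hmono : ∀ m ∈ t, pvNKey c n < pvNKey c m := fun m hm => (List.pairwise_cons.mp h1).1 m hm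
    have h1t := (List.pairwise_cons.mp h1).2
    have h2t : ∀ m ∈ t, ∀ r ∈ g m, pvName r = m := fun m hm => h2 m (by simp [hm])
    rcases lt_trichotomy (pvNKey c (pvName x)) (pvNKey c n) with hlt | heq | hgt
    · -- new smallest name: x goes in front of everything
      have hnotmem : pvName x ∉ n :: t := by
        intro hmem
        rcases List.mem_cons.mp hmem with h' | hm
        · exact lt_irrefl _ (h' ▸ hlt)
        · exact lt_asymm hlt (hmono _ hm)
      rw [if_neg hnotmem]
      have hall : ∀ y ∈ (n :: t).flatMap g, decide (pvRKey c x < pvRKey c y) = true := by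
        intro y hy
        rcases List.mem_flatMap.mp hy with ⟨m, hm, hym⟩
        have hnm : pvName y = m := h2 m hm y hym
        have : pvNKey c (pvName x) < pvNKey c (pvName y) := by
          rw [hnm]
          rcases List.mem_cons.mp hm with rfl | hmt
          · exact hlt
          · exact lt_trans hlt (hmono _ hmt)
        simp [pvRKey_lt_iff, this]
      rw [pv_insertBy_all_true _ _ _ hall]
      have hb : decide (pvNKey c (pvName x) < pvNKey c n) = true := by simp [hlt]
      have hins : PySem.List.insertBy (fun a b => decide (pvNKey c a < pvNKey c b)) (pvName x) (n :: t)
          = pvName x :: n :: t := by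
        simp [PySem.List.insertBy, hb]
      rw [hins]
      have hnn : n ≠ pvName x := fun h => hnotmem (by simp [h])
      have htcongr : ∀ m ∈ t, (if m = pvName x
            then PySem.List.insertBy (fun a b => decide ((-(pvCost a) : ℤ) < -(pvCost b))) x (g m)
            else g m) = g m := by
        intro m hm
        exact if_neg (fun hmx => hnotmem (by simp [hmx ▸ hm]))
      simp only [List.flatMap_cons]
      rw [if_pos trivial, h5 hnotmem, if_neg hnn, pv_flatMap_congr t _ g htcongr]
      simp [PySem.List.insertBy]
    · -- x's name is the head group
      have hxn : pvName x = n := pvNKey_inj c heq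
      rw [if_pos (by simp [hxn])]
      have htcongr : ∀ m ∈ t, (if m = pvName x
            then PySem.List.insertBy (fun a b => decide ((-(pvCost a) : ℤ) < -(pvCost b))) x (g m)
            else g m) = g m := by
        intro m hm
        refine if_neg (fun hmx => ?_)
        exact lt_irrefl _ (hxn ▸ hmx ▸ hmono _ hm)
      have hcb : ∀ y ∈ g n, decide (pvRKey c x < pvRKey c y)
          = decide ((-(pvCost x) : ℤ) < -(pvCost y)) := by
        intro y hy
        have hny : pvName y = n := h2 n (by simp) y hy
        apply decide_eq_decide.mpr
        rw [pvRKey_lt_iff]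
        constructor
        · rintro (h | ⟨_, h⟩)
          · rw [hxn, hny] at h; exact absurd h (lt_irrefl _)
          · exact h
        · intro h; exact Or.inr ⟨by rw [hxn, hny], h⟩
      simp only [List.flatMap_cons]
      rw [if_pos hxn.symm, pv_flatMap_congr t _ g htcongr]
      by_cases hall : ∀ y ∈ g n, decide (pvRKey c x < pvRKey c y) = false
      · rw [pv_insertBy_all_false _ _ _ _ hall]
        have htail : ∀ y ∈ t.flatMap g, decide (pvRKey c x < pvRKey c y) = true := by
          intro y hy
          rcases List.mem_flatMap.mp hy with ⟨m, hm, hym⟩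
          have : pvNKey c (pvName x) < pvNKey c (pvName y) := by
            rw [h2t m hm y hym, hxn]
            exact hmono _ hm
          simp [pvRKey_lt_iff, this]
        rw [pv_insertBy_all_true _ _ _ htail]
        have hgx : PySem.List.insertBy (fun a b => decide ((-(pvCost a) : ℤ) < -(pvCost b))) x (g n)
            = g n ++ [x] := by
          apply PySem.List.insertBy_of_forall_not_before
          intro y hy
          rw [← hcb y hy]
          exact hall y hy
        rw [hgx, List.append_assoc]
        rfl
      · have hex : ∃ y ∈ g n, decide (pvRKey c x < pvRKey c y) = true := by
          simp only [not_forall, Bool.not_eq_false] at hall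
          rcases hall with ⟨y, hy, hne⟩
          exact ⟨y, hy, by simpa using hne⟩
        rw [pv_insertBy_hit _ _ _ _ hex]
        rw [pv_insertBy_congr _ (fun a b => decide ((-(pvCost a) : ℤ) < -(pvCost b))) x (g n) hcb]
    · -- head group strictly smaller: skip it and recurse
      have hne : n ≠ pvName x := fun h => lt_irrefl _ (h ▸ hgt)
      have hmem_iff : (pvName x ∈ n :: t) ↔ pvName x ∈ t := by
        rw [List.mem_cons]
        constructor
        · rintro (h' | h')
          · exact absurd h'.symm hne
          · exact h'
        · exact Or.inr
      have hfalse : ∀ y ∈ g n, decide (pvRKey c x < pvRKey c y) = false := by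
        intro y hy
        have hny : pvName y = n := h2 n (by simp) y hy
        simp only [decide_eq_false_iff_not, pvRKey_lt_iff, hny]
        rintro (h | ⟨h, _⟩)
        · exact lt_asymm hgt h
        · exact hne h.symm
      rw [List.flatMap_cons, pv_insertBy_all_false _ _ _ _ hfalse]
      have h5t : pvName x ∉ t → g (pvName x) = [] := by
        intro ht
        exact h5 (fun hm => ht (hmem_iff.mp hm))
      rw [ih h1t h2t h5t]
      by_cases hmem : pvName x ∈ t
      · rw [if_pos hmem, if_pos (hmem_iff.mpr hmem)]
        simp only [List.flatMap_cons]
        rw [if_neg hne]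
      · rw [if_neg hmem, if_neg (fun h => hmem (hmem_iff.mp h))]
        have hskip : PySem.List.insertBy (fun a b => decide (pvNKey c a < pvNKey c b)) (pvName x) (n :: t)
            = n :: PySem.List.insertBy (fun a b => decide (pvNKey c a < pvNKey c b)) (pvName x) t := by
          simp [PySem.List.insertBy, lt_asymm hgt]
        rw [hskip]
        simp only [List.flatMap_cons]
        rw [if_neg hne]

lemma pv_names_pairwise (c : String → ℤ) (ys : List (List String)) :
    (pvNames c ys).Pairwise (fun a b => pvNKey c a < pvNKey c b) := by
  have hle := PySem.List.sorted_pairwise (PySem.Set.ofList (ys.map pvName)) (pvNKey c)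
  have hnd : (pvNames c ys).Nodup :=
    (PySem.List.sorted_perm (PySem.Set.ofList (ys.map pvName)) (pvNKey c) false).symm.nodup
      (PySem.Set.nodup_ofList _)
  have := hle.and hnd
  exact this.imp (fun {a b} hab =>
    lt_of_le_of_ne hab.1 (fun hk => hab.2 (pvNKey_inj c hk)))

lemma pv_sorted_snoc {α κ : Type} [LT κ] [DecidableLT κ] (l : List α) (x : α) (key : α → κ) :
    PySem.List.sorted (l ++ [x]) key false
      = PySem.List.insertBy (fun a b => decide (key a < key b)) x (PySem.List.sorted l key false) := by
  rw [PySem.List.sorted_eq_foldl_insertBy, PySem.List.sorted_eq_foldl_insertBy, List.foldl_append]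
  rfl

lemma pv_grp_snoc (ys : List (List String)) (x : List String) (n : String) :
    pvGrp (ys ++ [x]) n
      = if n = pvName x
        then PySem.List.insertBy (fun a b => decide ((-(pvCost a) : ℤ) < -(pvCost b))) x (pvGrp ys n)
        else pvGrp ys n := by
  unfold pvGrp
  rw [List.filter_append]
  by_cases h : n = pvName x
  · have : List.filter (fun r => pvName r == n) [x] = [x] := by simp [h]
    rw [this, if_pos h, pv_sorted_snoc]
  · have : List.filter (fun r => pvName r == n) [x] = [] := by
      have hb : (pvName x == n) = false := beq_eq_false_iff_ne.mpr (fun hx => h hx.symm)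
      simp [hb]
    rw [this, if_neg h, List.append_nil]

lemma pv_names_snoc (c : String → ℤ) (ys : List (List String)) (x : List String) :
    pvNames c (ys ++ [x])
      = if pvName x ∈ pvNames c ys then pvNames c ys
        else PySem.List.insertBy (fun a b => decide (pvNKey c a < pvNKey c b)) (pvName x) (pvNames c ys) := by
  unfold pvNames
  rw [List.map_append]
  simp only [List.map_cons, List.map_nil]
  have hadd : PySem.Set.ofList (ys.map pvName ++ [pvName x])
      = (PySem.Set.ofList (ys.map pvName)).add (pvName x) := by
    rw [PySem.Set.ofList_eq_foldl, PySem.Set.ofList_eq_foldl, List.foldl_append]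
    rfl
  rw [hadd]
  by_cases hm : pvName x ∈ PySem.Set.ofList (ys.map pvName)
  · rw [PySem.Set.add_of_mem hm,
      if_pos ((PySem.List.mem_sorted _ _ _ _).mpr hm)]
  · rw [PySem.Set.add_of_not_mem hm,
      if_neg (fun h => hm ((PySem.List.mem_sorted _ _ _ _).mp h)), pv_sorted_snoc]

lemma pv_foldl_eq_F (c : String → ℤ) (ys : List (List String)) :
    ys.foldl (fun acc r => PySem.List.insertBy (fun a b => decide (pvRKey c a < pvRKey c b)) r acc) []
      = pvF c ys := by
  induction ys using List.reverseRecOn with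
  | nil => rfl
  | append_singleton ys x ih =>
    rw [List.foldl_append, List.foldl_cons, List.foldl_nil, ih]
    have h2 : ∀ n ∈ pvNames c ys, ∀ r ∈ pvGrp ys n, pvName r = n := by
      intro n _ r hr
      have := (PySem.List.mem_sorted _ _ _ r).mp hr
      exact eq_of_beq (List.mem_filter.mp this).2
    have h5 : pvName x ∉ pvNames c ys → pvGrp ys (pvName x) = [] := by
      intro h
      have hfil : ys.filter (fun r => pvName r == pvName x) = [] := by
        rw [List.filter_eq_nil_iff]
        intro r hr hb
        apply h
        apply (PySem.List.mem_sorted _ _ _ _).mpr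
        apply (PySem.Set.mem_ofList _ _).mpr
        rw [← eq_of_beq hb]
        exact List.mem_map_of_mem hr
      unfold pvGrp
      rw [hfil]
      rfl
    show PySem.List.insertBy (fun a b => decide (pvRKey c a < pvRKey c b)) x
        ((pvNames c ys).flatMap (pvGrp ys)) = pvF c (ys ++ [x])
    rw [pv_insert_flat c (pvGrp ys) x (pvNames c ys) (pv_names_pairwise c ys) h2 h5]
    unfold pvF
    rw [pv_names_snoc]
    congr 1
    funext n
    rw [pv_grp_snoc]

lemma pv_A_eq_F (data : List (List String)) :
    sort_by_owner_tally data = pvF (pvC data) data := by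
  by_cases hd : data = []
  · subst hd; rfl
  · unfold sort_by_owner_tally
    rw [if_neg hd]
    show PySem.List.sorted2 data
        (fun row => -((PySem.Dict.counter (data.map (fun row => pvName row))).getD (pvName row) 0))
        (fun row => (toLex (pvName row, -(pvCost row)) : String ×ₗ ℤ)) false = _
    rw [pv_sorted2_eq_sorted_lex]
    have hkey : ∀ r ∈ data,
        (toLex (-((PySem.Dict.counter (data.map (fun row => pvName row))).getD (pvName r) 0),
          (toLex (pvName r, -(pvCost r)) : String ×ₗ ℤ)) : ℤ ×ₗ (String ×ₗ ℤ))
          = pvRKey (pvC data) r := by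
      intro r _
      unfold pvRKey pvC
      rw [PySem.Dict.getD_counter]
    rw [pv_sorted_key_congr _ _ _ hkey]
    rw [PySem.List.sorted_eq_foldl_insertBy]
    exact pv_foldl_eq_F (pvC data) data

lemma pv_B_eq_F (data : List (List String)) :
    sort_by_owner_tally_alt data = pvF (pvC data) data := by
  unfold sort_by_owner_tally_alt
  simp only [pv_keys, pv_bucket, PySem.List.len_eq]
  rw [pv_sorted2_eq_sorted_lex]
  have hkey : ∀ n ∈ PySem.Set.ofList (data.map pvName),
      (toLex (-((data.filter (fun r => pvName r == n)).length : ℤ), n) : ℤ ×ₗ String)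
        = pvNKey (pvC data) n := by
    intro n _
    rw [pv_filter_length]
    rfl
  rw [pv_sorted_key_congr _ _ _ hkey]
  rw [PySem.List.foldl_append_eq_flatMap]
  rw [List.nil_append]
  rfl

-- ===== VERDICT (by name: the statement is the Claim_ definition above) =====
theorem sort_by_owner_tally_spec : Claim_equal_sort_by_owner_tally := by
  intro data _ _
  unfold Spec_sort_by_owner_tally
  rw [pv_A_eq_F, pv_B_eq_F]
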